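-- pv_equiv track=rewrite | github.com/maelissteissier/adventOfCode | 2015/day5/day5.py | pass_rule_two_and_three
-- ===== SOURCE A (Python) =====
-- def pass_rule_two_and_three(santa_str_listified):
--     pass_rule_two = False
--     invalid_two_letters = {'ab', 'cd', 'pq', 'xy'}
--     pass_rule_three = True
--     i = 0
--     while i < len(santa_str_listified) - 1 and pass_rule_three:
--         pass_rule_two = pass_rule_two or santa_str_listified[i] == santa_str_listified[i+1]
--         pass_rule_three = not ((santa_str_listified[i] + santa_str_listified[i+1]) in invalid_two_letters)
--         i = i + 1
--     return pass_rule_two and pass_rule_three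
-- ===== SOURCE B (Python) =====
-- INVALID_PAIRS = {'ab', 'cd', 'pq', 'xy'}
--
-- def pass_rule_two_and_three(santa_str_listified):
--     pairs = list(zip(santa_str_listified, santa_str_listified[1:]))
--     if any(x + y in INVALID_PAIRS for x, y in pairs):
--         return False
--     return any(x == y for x, y in pairs)
-- ===== Notes on version B (the rewrite author's own statement) =====
-- stated objective: simpler
-- what changed: A's single interleaved while loop with early exit and two flag variables is replaced by two independent linear passes over the adjacent-pair list: any forbidden pair => False, otherwise any doubled element.
import Mathlib
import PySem

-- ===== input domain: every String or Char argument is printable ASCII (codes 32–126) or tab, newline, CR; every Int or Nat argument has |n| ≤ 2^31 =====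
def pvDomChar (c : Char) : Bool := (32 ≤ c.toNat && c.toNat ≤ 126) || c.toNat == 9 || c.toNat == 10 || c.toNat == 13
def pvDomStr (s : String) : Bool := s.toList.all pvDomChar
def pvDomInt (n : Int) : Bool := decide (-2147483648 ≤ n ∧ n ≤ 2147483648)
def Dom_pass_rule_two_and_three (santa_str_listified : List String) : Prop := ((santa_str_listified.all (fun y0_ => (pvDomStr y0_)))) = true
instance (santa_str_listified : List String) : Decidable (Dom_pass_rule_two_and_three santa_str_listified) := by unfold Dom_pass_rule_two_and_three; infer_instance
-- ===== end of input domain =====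

-- B replaces A's single interleaved early-exit while loop by two independent linear passes
-- over the adjacent-pair list (forbidden-pair scan, then doubled-letter scan); objective: simpler.

-- ===== PORT A =====
-- the literal Python set {'ab','cd','pq','xy'}; membership test = list membership on the distinct elements
def pvInvalidA : List String := ["ab", "cd", "pq", "xy"]

-- the while loop of A: state (i, pass_rule_two, pass_rule_three); condition i < len-1 and pass_rule_three.
-- indices i, i+1 are always in range under the loop condition, so List.getD is exact for xs[i] / xs[i+1].
def passLoopA (xs : List String) (i : Nat) (r2 r3 : Bool) : Bool × Bool :=
  if _h : i < xs.length - 1 ∧ r3 = true then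
    let r2' := r2 || (xs.getD i "" == xs.getD (i+1) "")
    let r3' := ! (pvInvalidA.contains (xs.getD i "" ++ xs.getD (i+1) ""))
    passLoopA xs (i+1) r2' r3'
  else (r2, r3)
termination_by xs.length - 1 - i
decreasing_by omega

def pass_rule_two_and_three (santa_str_listified : List String) : Bool :=
  let st := passLoopA santa_str_listified 0 false true
  st.1 && st.2

-- ===== PORT B =====
-- pairs = zip(s, s[1:]); two separate any-scans, forbidden-pair scan first
def pass_rule_two_and_three_alt (santa_str_listified : List String) : Bool :=
  let pairs := santa_str_listified.zip (santa_str_listified.drop 1)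
  if pairs.any (fun p => pvInvalidA.contains (p.1 ++ p.2)) then false
  else pairs.any (fun p => p.1 == p.2)

-- ===== PRECONDITION & SPEC =====
def Spec_pass_rule_two_and_three (santa_str_listified : List String) (out : Bool) : Prop := out = pass_rule_two_and_three_alt santa_str_listified
instance (santa_str_listified : List String) (out : Bool) : Decidable (Spec_pass_rule_two_and_three santa_str_listified out) := by unfold Spec_pass_rule_two_and_three; infer_instance

-- ===== CLAIM (what is proved, stated in full; the proofs are below) =====
def Claim_equal_pass_rule_two_and_three : Prop := ∀ (santa_str_listified : List String), Dom_pass_rule_two_and_three santa_str_listified → Spec_pass_rule_two_and_three santa_str_listified (pass_rule_two_and_three santa_str_listified)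

-- ===== LEMMAS AND PROOFS =====

-- the list of adjacent pairs from index i on
def pvPairsFrom (xs : List String) (i : Nat) : List (String × String) :=
  (xs.drop i).zip (xs.drop (i+1))

lemma pvPairsFrom_nil (xs : List String) (i : Nat) (h : xs.length - 1 ≤ i) :
    pvPairsFrom xs i = [] := by
  unfold pvPairsFrom
  rw [show xs.drop (i+1) = [] from List.drop_eq_nil_of_le (by omega)]
  simp

lemma pvPairsFrom_cons (xs : List String) (i : Nat) (h : i + 1 < xs.length) :
    pvPairsFrom xs i = (xs[i], xs[i+1]) :: pvPairsFrom xs (i+1) := by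
  unfold pvPairsFrom
  rw [List.drop_eq_getElem_cons (by omega : i < xs.length),
      List.drop_eq_getElem_cons (h := h)]
  rw [List.zip_cons_cons, ← List.drop_eq_getElem_cons (h := h)]

-- loop invariant: remaining loop result (entered with pass_rule_three = true)
lemma passLoopA_spec (xs : List String) :
    ∀ n i r2, n = xs.length - 1 - i →
    ((passLoopA xs i r2 true).1 && (passLoopA xs i r2 true).2)
      = (if (pvPairsFrom xs i).any (fun p => pvInvalidA.contains (p.1 ++ p.2)) then false
         else r2 || (pvPairsFrom xs i).any (fun p => p.1 == p.2)) := by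
  intro n
  induction n with
  | zero =>
      intro i r2 hn
      rw [passLoopA]
      rw [pvPairsFrom_nil xs i (by omega)]
      simp [show ¬ i < xs.length - 1 by omega]
  | succ n ih =>
      intro i r2 hn
      have hi : i < xs.length - 1 := by omega
      have hi1 : i + 1 < xs.length := by omega
      have hgi : xs.getD i "" = xs[i] := List.getD_eq_getElem xs "" (by omega)
      have hgi1 : xs.getD (i+1) "" = xs[i+1] := List.getD_eq_getElem xs "" hi1
      rw [passLoopA]
      rw [dif_pos ⟨hi, rfl⟩]
      rw [pvPairsFrom_cons xs i hi1]
      simp only [hgi, hgi1, List.any_cons]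
      by_cases hf : pvInvalidA.contains (xs[i] ++ xs[i+1]) = true
      · -- forbidden pair found: the next iteration exits with pass_rule_three = false
        rw [hf]
        rw [passLoopA]
        simp
      · simp only [Bool.not_eq_true] at hf
        rw [hf]
        simp only [Bool.not_false]
        rw [ih (i+1) _ (by omega)]
        simp only [Bool.false_or]
        split <;> simp [Bool.or_assoc]

-- ===== VERDICT (by name: the statement is the Claim_ definition above) =====
theorem pass_rule_two_and_three_spec : Claim_equal_pass_rule_two_and_three := by
  intro xs _
  unfold Spec_pass_rule_two_and_three pass_rule_two_and_three pass_rule_two_and_three_alt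
  have h := passLoopA_spec xs (xs.length - 1 - 0) 0 false rfl
  simp only [pvPairsFrom, List.drop_zero] at h
  rw [h]
  simp [pvInvalidA, pvInvalidA]
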